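-- pv_equiv track=rewrite | github.com/riaz-khan-16/189_problems_of_Cracking_Coding_Interview_Book | Recursion_Medium/13.perfect_square.py | f
-- ===== SOURCE A (Python) =====
-- def f(x,c,possible_squares):
--     if x==0:
--         l=[]
--         l.append(c)
--         return l
--     if x<0:
--         l=[]
--         return l
--     li=[]
--     for i in possible_squares:
--         li= li+f(x-i,c+1,possible_squares)
--
--     return li
-- ===== SOURCE B (Python) =====
-- def f(x, c, possible_squares):
--     if x == 0:
--         return [c]
--     if x < 0:
--         return []
--     # bottom-up DP: table[v] = depths (from base 0) of all ordered compositions of v,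
--     # in the same DFS order A emits them; each row is computed once and shared.
--     table = [[0]]
--     for v in range(1, x + 1):
--         row = []
--         for i in possible_squares:
--             if v - i >= 0:
--                 row += [d + 1 for d in table[v - i]]
--         table.append(row)
--     return [d + c for d in table[x]]
-- ===== Notes on version B (the rewrite author's own statement) =====
-- stated objective: alternative
-- what changed: Replaced A's top-down recursion by a bottom-up dynamic-programming table of per-value depth lists (each value's row computed once and shared), with a final +c shift; the output list itself is exponential in size, so overall cost stays output-bound.
import Mathlib
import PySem

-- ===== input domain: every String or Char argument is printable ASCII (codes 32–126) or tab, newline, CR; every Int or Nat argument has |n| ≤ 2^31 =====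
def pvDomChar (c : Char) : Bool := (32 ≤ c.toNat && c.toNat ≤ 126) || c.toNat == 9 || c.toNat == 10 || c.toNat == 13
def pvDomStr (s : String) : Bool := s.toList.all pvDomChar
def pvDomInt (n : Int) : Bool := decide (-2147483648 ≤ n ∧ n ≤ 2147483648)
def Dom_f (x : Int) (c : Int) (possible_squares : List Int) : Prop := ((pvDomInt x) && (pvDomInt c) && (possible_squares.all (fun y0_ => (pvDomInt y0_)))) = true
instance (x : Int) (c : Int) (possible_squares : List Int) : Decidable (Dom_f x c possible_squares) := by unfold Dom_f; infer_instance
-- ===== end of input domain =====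

-- B replaces A's top-down recursion by a bottom-up DP table of per-value depth lists,
-- each row computed once and shared, then shifted by c at the end (alternative decomposition).

-- ===== PORT A =====
-- A's recursion is ported with a fuel counter; inside Pre_f (x ≤ 0, or every step ≥ 1)
-- fuel x.toNat + 1 is enough, so the port computes exactly A's value there.
def fAux (ps : List Int) : Nat → Int → Int → List Int
  | 0, _, _ => []
  | fuel + 1, x, c =>
    if x = 0 then [c]
    else if x < 0 then []
    else ps.foldl (fun li i => li ++ fAux ps fuel (x - i) (c + 1)) []

def f (x : Int) (c : Int) (possible_squares : List Int) : List Int :=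
  fAux possible_squares (x.toNat + 1) x c

-- ===== PORT B =====
-- row for value v, reading earlier rows from the table (Python's inner loop)
def buildRow (ps : List Int) (table : List (List Int)) (v : Int) : List Int :=
  ps.foldl (fun row i =>
    if 0 ≤ v - i then row ++ (table.getD (v - i).toNat []).map (· + 1) else row) []

-- table after the v-loop has run up to v = n (Python's `for v in range(1, x+1)`)
def buildTable (ps : List Int) : Nat → List (List Int)
  | 0 => [[0]]
  | n + 1 => let t := buildTable ps n; t ++ [buildRow ps t ((n : Int) + 1)]

def f_alt (x : Int) (c : Int) (possible_squares : List Int) : List Int :=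
  if x = 0 then [c]
  else if x < 0 then []
  else ((buildTable possible_squares x.toNat).getD x.toNat []).map (· + c)

-- ===== PRECONDITION & SPEC =====
-- Pre_f excludes exactly the inputs on which A never returns: x > 0 together with some step
-- i ≤ 0 in possible_squares makes A recurse forever (RecursionError); B raises IndexError there.
def Pre_f (x : Int) (c : Int) (possible_squares : List Int) : Prop :=
  x ≤ 0 ∨ ∀ i ∈ possible_squares, 1 ≤ i
instance (x : Int) (c : Int) (possible_squares : List Int) : Decidable (Pre_f x c possible_squares) := by unfold Pre_f; infer_instance

def pvWitness_f : Int × Int × List Int := (5, 0, [1, 4])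

def Spec_f (x : Int) (c : Int) (possible_squares : List Int) (out : List Int) : Prop := out = f_alt x c possible_squares
instance (x : Int) (c : Int) (possible_squares : List Int) (out : List Int) : Decidable (Spec_f x c possible_squares out) := by unfold Spec_f; infer_instance

-- ===== CLAIM (what is proved, stated in full; the proofs are below) =====
def Claim_equal_f : Prop := ∀ (x : Int) (c : Int) (possible_squares : List Int), Dom_f x c possible_squares → Pre_f x c possible_squares → Spec_f x c possible_squares (f x c possible_squares)

-- ===== LEMMAS AND PROOFS =====

-- the x > 0 step of A, as a flatMap
theorem fAux_pos (ps : List Int) (fuel : Nat) (x c : Int) (hx : 0 < x) :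
    fAux ps (fuel + 1) x c = ps.flatMap (fun i => fAux ps fuel (x - i) (c + 1)) := by
  have h0 : ¬ x = 0 := by omega
  have h1 : ¬ x < 0 := by omega
  simp [fAux, h0, h1, PySem.List.foldl_append_eq_flatMap, List.flatMap_def]

-- shifting the counter shifts every output element
theorem fAux_shift (ps : List Int) (fuel : Nat) :
    ∀ (x c d : Int), fAux ps fuel x (c + d) = (fAux ps fuel x c).map (· + d) := by
  induction fuel with
  | zero => intro x c d; simp [fAux]
  | succ fuel ih =>
    intro x c d
    by_cases h0 : x = 0
    · simp [fAux, h0]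
    · by_cases h1 : x < 0
      · simp [fAux, h0, h1]
      · have hx : 0 < x := by omega
        rw [fAux_pos ps fuel x (c + d) hx, fAux_pos ps fuel x c hx, List.map_flatMap]
        refine List.flatMap_congr (fun i _ => ?_)
        have : c + d + 1 = (c + 1) + d := by ring
        rw [this, ih]

-- any two sufficient fuels give the same result (steps taken from ps are all ≥ 1)
theorem fAux_stable (ps : List Int) (hps : ∀ i ∈ ps, 1 ≤ i) :
    ∀ (f1 : Nat), ∀ (f2 : Nat) (x c : Int), x.toNat < f1 → x.toNat < f2 →
      fAux ps f1 x c = fAux ps f2 x c := by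
  intro f1
  induction f1 with
  | zero => intro f2 x c h1 _; omega
  | succ fuel ih =>
    intro f2 x c h1 h2
    match f2, h2 with
    | g + 1, _ =>
      by_cases h0 : x = 0
      · simp [fAux, h0]
      · by_cases hneg : x < 0
        · simp [fAux, h0, hneg]
        · have hx : 0 < x := by omega
          rw [fAux_pos ps fuel x c hx, fAux_pos ps g x c hx]
          refine List.flatMap_congr (fun i hi => ?_)
          have hi1 := hps i hi
          have hlt : (x - i).toNat < x.toNat := by omega
          exact ih g (x - i) (c + 1) (by omega) (by omega)

theorem buildTable_length (ps : List Int) (n : Nat) : (buildTable ps n).length = n + 1 := by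
  induction n with
  | zero => simp [buildTable]
  | succ n ih => simp [buildTable, ih]

-- conditional-append loops as flatMap
theorem foldl_ite_append_eq_flatMap {α β : Type} (p : α → Prop) [DecidablePred p]
    (g : α → List β) (l : List α) (init : List β) :
    l.foldl (fun acc x => if p x then acc ++ g x else acc) init
      = init ++ l.flatMap (fun x => if p x then g x else []) := by
  induction l generalizing init with
  | nil => simp
  | cons a t ih =>
    by_cases hp : p a <;> simp [hp, ih, List.append_assoc]

-- the DP table rows equal A's results at counter 0 (with just-sufficient fuel)
theorem buildTable_correct (ps : List Int) (hps : ∀ i ∈ ps, 1 ≤ i) (n : Nat) :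
    ∀ k ≤ n, (buildTable ps n).getD k [] = fAux ps (k + 1) (k : Int) 0 := by
  induction n with
  | zero =>
    intro k hk
    interval_cases k
    simp [buildTable, fAux]
  | succ n ih =>
    intro k hk
    rcases Nat.lt_or_ge k (n + 1) with hlt | hge
    · -- an old row, untouched by the append
      have : (buildTable ps (n + 1)).getD k [] = (buildTable ps n).getD k [] := by
        simp only [buildTable]
        rw [List.getD, List.getD, List.getElem?_append_left (by rw [buildTable_length]; omega)]
      rw [this]; exact ih k (by omega)
    · -- the new row
      have hk1 : k = n + 1 := by omega
      subst hk1
      have hnew : (buildTable ps (n + 1)).getD (n + 1) [] =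
          buildRow ps (buildTable ps n) ((n : Int) + 1) := by
        simp only [buildTable]
        rw [List.getD, List.getElem?_append_right (by rw [buildTable_length])]
        simp [buildTable_length]
      rw [hnew]
      have hcast1 : ((n + 1 : Nat) : Int) = (n : Int) + 1 := by push_cast; ring
      rw [show ((n + 1 : Nat) + 1) = (n + 1) + 1 from rfl,
          fAux_pos ps (n + 1) ((n + 1 : Nat) : Int) 0 (by omega), hcast1]
      unfold buildRow
      rw [foldl_ite_append_eq_flatMap (fun i => 0 ≤ (n : Int) + 1 - i)
            (fun i => ((buildTable ps n).getD ((n : Int) + 1 - i).toNat []).map (· + 1)) ps []]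
      rw [List.nil_append]
      refine List.flatMap_congr (fun i hi => ?_)
      have hi1 := hps i hi
      by_cases hnn : 0 ≤ (n : Int) + 1 - i
      · -- v - i ≥ 0: row (v-i) of the table, shifted by 1
        have hkk : ((n : Int) + 1 - i).toNat ≤ n := by omega
        rw [if_pos hnn, ih _ hkk]
        have hcast : ((((n : Int) + 1 - i).toNat : Int)) = (n : Int) + 1 - i := by omega
        rw [hcast]
        rw [fAux_shift ps (n + 1) ((n : Int) + 1 - i) 0 1]
        rw [fAux_stable ps hps (((n : Int) + 1 - i).toNat + 1) (n + 1) ((n : Int) + 1 - i) 0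
              (by omega) (by omega)]
      · -- v - i < 0: both sides empty
        rw [if_neg hnn]
        have h1 : (n : Int) + 1 - i < 0 := by omega
        simp [fAux, h1, show ¬ (n : Int) + 1 - i = 0 by omega]

-- ===== VERDICT (by name: the statement is the Claim_ definition above) =====
theorem f_spec : Claim_equal_f := by
  intro x c ps _ hpre
  unfold Spec_f f f_alt
  by_cases h0 : x = 0
  · subst h0; simp [fAux]
  · by_cases hneg : x < 0
    · have ht : x.toNat = 0 := by omega
      simp [fAux, hneg]
    · have hx : 0 < x := by omega
      have hps : ∀ i ∈ ps, 1 ≤ i := by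
        rcases hpre with h | h
        · omega
        · exact h
      rw [if_neg h0, if_neg hneg]
      rw [buildTable_correct ps hps x.toNat x.toNat (le_refl _)]
      have hcast : ((x.toNat : Int)) = x := by omega
      rw [hcast]
      have := fAux_shift ps (x.toNat + 1) x 0 c
      simpa using this
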